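-- pv_equiv track=rewrite | github.com/EIMI-Institute/CeFloPS | simulation/sim_output_generation.py | curr_substate
-- ===== SOURCE A (Python) =====
-- def curr_substate(substate, dic, time):
--     sub = substate
--     sorted_keys = sorted(dic.keys())
--     most_recent_key = None
--     for key in sorted_keys:
--         if key < time:
--             most_recent_key = key
--         else:
--             break
--
--     if most_recent_key is not None:
--         return dic[most_recent_key]
--     else:
--         return sub
-- ===== SOURCE B (Python) =====
-- def curr_substate(substate, dic, time):
--     below = [k for k in dic if k < time]
--     return dic[max(below)] if below else substate
-- ===== Notes on version B (the rewrite author's own statement) =====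
-- stated objective: idiomatic
-- what changed: Replaces A's sort-then-linear-scan-with-break by a single filter of the keys below time and one max() over them (no sorting at all).
import Mathlib
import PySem

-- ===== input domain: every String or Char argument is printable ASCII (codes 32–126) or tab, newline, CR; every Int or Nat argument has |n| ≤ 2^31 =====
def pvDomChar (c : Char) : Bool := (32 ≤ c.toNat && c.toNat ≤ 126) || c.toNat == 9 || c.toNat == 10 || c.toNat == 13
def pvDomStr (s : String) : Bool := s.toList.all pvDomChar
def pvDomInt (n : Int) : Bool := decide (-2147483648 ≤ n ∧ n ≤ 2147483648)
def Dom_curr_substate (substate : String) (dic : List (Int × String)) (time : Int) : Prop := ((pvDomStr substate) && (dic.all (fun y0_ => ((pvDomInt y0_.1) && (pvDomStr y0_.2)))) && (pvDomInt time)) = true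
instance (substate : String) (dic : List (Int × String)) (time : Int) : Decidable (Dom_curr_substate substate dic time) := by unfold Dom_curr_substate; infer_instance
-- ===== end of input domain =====

-- B replaces A's sort-then-scan-with-break by one filter of keys below time plus max(); idiomatic, no sort.

-- ===== PORT A =====
-- the 'for key in sorted_keys: if key < time: most_recent_key = key else: break' loop
def pvLoopA (time : Int) : List Int → Option Int → Option Int
  | [], acc => acc
  | k :: rest, acc => if k < time then pvLoopA time rest (some k) else acc

def curr_substate (substate : String) (dic : List (Int × String)) (time : Int) : String :=
  match pvLoopA time (PySem.List.sorted (PySem.Dict.keys (PySem.Dict.ofList dic)) (fun k => k) false) none with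
  | some k => (PySem.Dict.get? (PySem.Dict.ofList dic) k).getD ""   -- default unreachable: k is drawn from the dict's keys
  | none => substate

-- ===== PORT B =====
def curr_substate_alt (substate : String) (dic : List (Int × String)) (time : Int) : String :=
  match PySem.List.max? ((PySem.Dict.keys (PySem.Dict.ofList dic)).filter (fun k => decide (k < time))) (fun k => k) with
  | some m => (PySem.Dict.get? (PySem.Dict.ofList dic) m).getD ""   -- default unreachable: m is drawn from the dict's keys
  | none => substate

-- ===== PRECONDITION & SPEC =====
def Spec_curr_substate (substate : String) (dic : List (Int × String)) (time : Int) (out : String) : Prop := out = curr_substate_alt substate dic time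
instance (substate : String) (dic : List (Int × String)) (time : Int) (out : String) : Decidable (Spec_curr_substate substate dic time out) := by unfold Spec_curr_substate; infer_instance

-- ===== CLAIM (what is proved, stated in full; the proofs are below) =====
def Claim_equal_curr_substate : Prop := ∀ (substate : String) (dic : List (Int × String)) (time : Int), Dom_curr_substate substate dic time → Spec_curr_substate substate dic time (curr_substate substate dic time)

-- ===== LEMMAS AND PROOFS =====

-- max of two optional ints
def pvOMax : Option Int → Option Int → Option Int
  | none, b => b
  | some a, none => some a
  | some a, some b => some (max a b)

-- the maximum element strictly below t, structurally
def pvMB (t : Int) : List Int → Option Int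
  | [] => none
  | x :: s => if x < t then pvOMax (some x) (pvMB t s) else pvMB t s

theorem pvOMax_none_right (a : Option Int) : pvOMax a none = a := by
  cases a <;> rfl

theorem pvOMax_comm (a b : Option Int) : pvOMax a b = pvOMax b a := by
  cases a <;> cases b <;> simp [pvOMax, max_comm]

theorem pvOMax_assoc (a b c : Option Int) : pvOMax (pvOMax a b) c = pvOMax a (pvOMax b c) := by
  cases a <;> cases b <;> cases c <;> simp [pvOMax, max_assoc]

theorem pvMB_perm (t : Int) {l₁ l₂ : List Int} (h : l₁.Perm l₂) : pvMB t l₁ = pvMB t l₂ := by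
  induction h with
  | nil => rfl
  | cons x _ ih => simp [pvMB, ih]
  | swap x y s =>
      simp only [pvMB]
      by_cases hx : x < t <;> by_cases hy : y < t <;>
        simp [hx, hy, ← pvOMax_assoc, pvOMax_comm (some x) (some y)]
  | trans _ _ ih₁ ih₂ => exact ih₁.trans ih₂

theorem pvMB_eq_none_of_ge (t : Int) (s : List Int) (h : ∀ y ∈ s, t ≤ y) : pvMB t s = none := by
  induction s with
  | nil => rfl
  | cons x s ih =>
      have hx : ¬ x < t := not_lt.mpr (h x (by simp))
      simp [pvMB, hx, ih (fun y hy => h y (by simp [hy]))]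

theorem pvOMax_some_max? (x : Int) (f : List Int) :
    pvOMax (some x) (PySem.List.max? f (fun k => k)) = some (f.foldl max x) := by
  induction f generalizing x with
  | nil => rfl
  | cons y f ih =>
      rw [PySem.List.max?_id_cons]
      simp only [pvOMax, List.foldl_cons, Option.some.injEq]
      exact (List.foldl_assoc (op := max) (l := f) (a₁ := x) (a₂ := y)).symm

-- B's max() over the filtered list is pvMB
theorem pvMax_filter_eq_pvMB (t : Int) (l : List Int) :
    PySem.List.max? (l.filter (fun k => decide (k < t))) (fun k => k) = pvMB t l := by
  induction l with
  | nil => rfl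
  | cons x l ih =>
      by_cases hx : x < t
      · simp [hx, PySem.List.max?_id_cons, pvMB, ← ih, pvOMax_some_max?]
      · simp [hx, pvMB, ih]

-- A's scan of a ≤-sorted list computes pvMB
theorem pvLoopA_sorted (t : Int) (s : List Int) (hs : s.Pairwise (· ≤ ·)) :
    ∀ acc : Option Int, (∀ a, acc = some a → ∀ y ∈ s, a ≤ y) →
      pvLoopA t s acc = pvOMax acc (pvMB t s) := by
  induction s with
  | nil => intro acc _; simp [pvLoopA, pvMB, pvOMax_none_right]
  | cons x s ih =>
      intro acc hacc
      rcases List.pairwise_cons.mp hs with ⟨hxle, hs'⟩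
      by_cases hx : x < t
      · have hstep := ih hs' (some x) (fun a ha y hy => by cases ha; exact hxle y hy)
        have hax : pvOMax acc (some x) = some x := by
          cases acc with
          | none => rfl
          | some a =>
              have : a ≤ x := hacc a rfl x (by simp)
              simp [pvOMax, max_eq_right this]
        calc pvLoopA t (x :: s) acc = pvLoopA t s (some x) := by simp [pvLoopA, hx]
          _ = pvOMax (some x) (pvMB t s) := hstep
          _ = pvOMax (pvOMax acc (some x)) (pvMB t s) := by rw [hax]
          _ = pvOMax acc (pvMB t (x :: s)) := by
                rw [pvOMax_assoc]; simp [pvMB, hx]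
      · have hnone : pvMB t (x :: s) = none := by
          apply pvMB_eq_none_of_ge
          intro y hy
          rcases List.mem_cons.mp hy with rfl | hy'
          · exact not_lt.mp hx
          · exact le_trans (not_lt.mp hx) (hxle y hy')
        simp [pvLoopA, hx, hnone, pvOMax_none_right]

theorem pv_key_eq (t : Int) (keys : List Int) :
    pvLoopA t (PySem.List.sorted keys (fun k => k) false) none =
      PySem.List.max? (keys.filter (fun k => decide (k < t))) (fun k => k) := by
  rw [pvMax_filter_eq_pvMB,
    pvLoopA_sorted t _ (PySem.List.sorted_pairwise keys (fun k => k)) none (by simp)]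
  exact pvMB_perm t (PySem.List.sorted_perm keys (fun k => k) false)

-- ===== VERDICT (by name: the statement is the Claim_ definition above) =====
theorem curr_substate_spec : Claim_equal_curr_substate := by
  intro substate dic time _
  unfold Spec_curr_substate curr_substate curr_substate_alt
  rw [pv_key_eq]
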